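-- pv_equiv track=rewrite | github.com/XCreeperPa/pmsm | pmsm/log_manager.py | _convert_wildcard_to_sql
-- ===== SOURCE A (Python) =====
-- def _convert_wildcard_to_sql(pattern):
--     """将通配符模式转换为SQL LIKE模式"""
--     # 先转义所有特殊字符
--     escaped = pattern.replace('\\', '\\\\').replace('%', '\\%').replace('_', '\\_')
--     # 将未转义的 * 转换为 %
--     result = ''
--     i = 0
--     while i < len(escaped):
--         if escaped[i:i+2] == '\\*':  # 转义的 *
--             result += '*'
--             i += 2
--         elif escaped[i] == '*':  # 未转义的 *
--             result += '%'
--             i += 1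
--         else:
--             result += escaped[i]
--             i += 1
--     return result
-- ===== SOURCE B (Python) =====
-- def _convert_wildcard_to_sql(pattern):
--     """将通配符模式转换为SQL LIKE模式 — single fused pass over the original pattern."""
--     out = []
--     i = 0
--     n = len(pattern)
--     while i < n:
--         c = pattern[i]
--         if c == '\\' and i + 1 < n and pattern[i + 1] == '*':
--             out.append('\\*')
--             i += 2
--         elif c == '\\':
--             out.append('\\\\')
--             i += 1
--         elif c == '*':
--             out.append('%')
--             i += 1
--         elif c == '%':
--             out.append('\\%')
--             i += 1
--         elif c == '_':
--             out.append('\\_')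
--             i += 1
--         else:
--             out.append(c)
--             i += 1
--     return ''.join(out)
-- ===== Notes on version B (the rewrite author's own statement) =====
-- stated objective: faster
-- what changed: B fuses A's three global replace passes and the rescan loop into one single pass over the original pattern, never building the intermediate escaped string.
import Mathlib
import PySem

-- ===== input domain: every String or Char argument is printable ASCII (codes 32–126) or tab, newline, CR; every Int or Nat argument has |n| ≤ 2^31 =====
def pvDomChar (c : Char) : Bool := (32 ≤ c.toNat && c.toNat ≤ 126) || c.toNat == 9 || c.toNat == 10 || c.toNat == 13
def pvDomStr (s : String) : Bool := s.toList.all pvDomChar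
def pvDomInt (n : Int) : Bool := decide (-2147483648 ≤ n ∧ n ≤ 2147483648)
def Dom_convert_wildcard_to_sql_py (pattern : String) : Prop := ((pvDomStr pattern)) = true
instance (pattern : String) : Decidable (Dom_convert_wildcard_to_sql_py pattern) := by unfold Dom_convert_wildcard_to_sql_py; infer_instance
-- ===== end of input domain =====

-- B fuses A's three replace passes and the rescan loop into one single pass over the
-- original pattern (no intermediate escaped string); a timing run measures the speed claim.


-- ===== PORT A =====
-- the while loop over `escaped` with the 2-char lookahead slice, as structural recursion
def pvScanA : List Char → List Char
  | '\\' :: '*' :: rest => '*' :: pvScanA rest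
  | '*' :: rest => '%' :: pvScanA rest
  | c :: rest => c :: pvScanA rest
  | [] => []

def convert_wildcard_to_sql_py (pattern : String) : String :=
  let escaped := PySem.Str.replace (PySem.Str.replace (PySem.Str.replace pattern "\\" "\\\\") "%" "\\%") "_" "\\_"
  String.ofList (pvScanA escaped.toList)

-- ===== PORT B =====
-- single pass over the original pattern
def pvScanB : List Char → List Char
  | '\\' :: '*' :: rest => '\\' :: '*' :: pvScanB rest
  | '\\' :: rest => '\\' :: '\\' :: pvScanB rest
  | '*' :: rest => '%' :: pvScanB rest
  | '%' :: rest => '\\' :: '%' :: pvScanB rest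
  | '_' :: rest => '\\' :: '_' :: pvScanB rest
  | c :: rest => c :: pvScanB rest
  | [] => []

def convert_wildcard_to_sql_py_alt (pattern : String) : String :=
  String.ofList (pvScanB pattern.toList)

-- ===== PRECONDITION & SPEC =====
def Spec_convert_wildcard_to_sql_py (pattern : String) (out : String) : Prop := out = convert_wildcard_to_sql_py_alt pattern
instance (pattern : String) (out : String) : Decidable (Spec_convert_wildcard_to_sql_py pattern out) := by unfold Spec_convert_wildcard_to_sql_py; infer_instance

-- ===== CLAIM (what is proved, stated in full; the proofs are below) =====
def Claim_equal_convert_wildcard_to_sql_py : Prop := ∀ (pattern : String), Dom_convert_wildcard_to_sql_py pattern → Spec_convert_wildcard_to_sql_py pattern (convert_wildcard_to_sql_py pattern)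

-- ===== LEMMAS AND PROOFS =====

-- single-character needle: Python replace is a per-character flatMap
theorem pvGo_single (c : Char) (new : List Char) :
    ∀ (l acc : List Char),
      PySem.Chars.replace.go [c] new l.length l acc
        = acc.reverse ++ l.flatMap (fun d => if d = c then new else [d]) := by
  intro l
  induction l with
  | nil => intro acc; simp [PySem.Chars.replace.go]
  | cons d t ih =>
      intro acc
      by_cases h : d = c
      · subst h
        simp [PySem.Chars.replace.go, List.isPrefixOf, ih]
      · simp [PySem.Chars.replace.go, List.isPrefixOf, Ne.symm h, h, ih]

theorem pvReplace_single (l : List Char) (c : Char) (new : List Char) :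
    PySem.Chars.replace l [c] new = l.flatMap (fun d => if d = c then new else [d]) := by
  simpa [PySem.Chars.replace] using pvGo_single c new l []

-- the composed effect of the three replaces, per original character
def pvEsc (c : Char) : List Char :=
  if c = '\\' then ['\\', '\\']
  else if c = '%' then ['\\', '%']
  else if c = '_' then ['\\', '_']
  else [c]

theorem pvEscaped_eq (l : List Char) :
    PySem.Chars.replace (PySem.Chars.replace (PySem.Chars.replace l ['\\'] ['\\', '\\']) ['%'] ['\\', '%']) ['_'] ['\\', '_']
      = l.flatMap pvEsc := by
  simp only [pvReplace_single, List.flatMap_assoc]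
  apply List.flatMap_congr  -- pointwise on characters of l
  intro c _
  by_cases h1 : c = '\\'
  · subst h1; decide
  · by_cases h2 : c = '%'
    · subst h2; decide
    · by_cases h3 : c = '_'
      · subst h3; decide
      · simp [pvEsc, h1, h2, h3]

-- main lemma: A's scan of the escaped text is B's fused scan of the original
theorem pvScanA_flatMap (l : List Char) : pvScanA (l.flatMap pvEsc) = pvScanB l := by
  induction l using pvScanB.induct with
  | case1 rest ih => simpa [pvEsc, pvScanA, pvScanB] using ih
  | case2 rest h ih =>
      -- '\\' :: rest, rest not starting with '*'
      match rest, h, ih with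
      | [], _, _ => simp [pvEsc, pvScanA, pvScanB]
      | d :: t, h, ih =>
          have hd : d ≠ '*' := by intro hh; exact h t (by rw [hh])
          -- head of (pvEsc d ++ …) is '\\' or d (≠ '*'); unfold two scanA steps
          by_cases h1 : d = '\\'
          · subst h1; simpa [pvEsc, pvScanA, pvScanB] using ih
          · by_cases h2 : d = '%'
            · subst h2; simpa [pvEsc, pvScanA, pvScanB] using ih
            · by_cases h3 : d = '_'
              · subst h3; simpa [pvEsc, pvScanA, pvScanB] using ih
              · simpa [pvEsc, pvScanA, pvScanB, h1, h2, h3, hd] using ih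
  | case3 rest ih => simpa [pvEsc, pvScanA, pvScanB] using ih
  | case4 rest ih => simpa [pvEsc, pvScanA, pvScanB] using ih
  | case5 rest ih => simpa [pvEsc, pvScanA, pvScanB] using ih
  | case6 c rest h1 h2 h3 h4 h5 ih =>
      simp_all [pvEsc, pvScanA, pvScanB]
  | case7 => rfl

-- ===== VERDICT (by name: the statement is the Claim_ definition above) =====
theorem convert_wildcard_to_sql_py_spec : Claim_equal_convert_wildcard_to_sql_py := by
  intro pattern _
  unfold Spec_convert_wildcard_to_sql_py convert_wildcard_to_sql_py convert_wildcard_to_sql_py_alt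
  simp [PySem.Str.toList_replace, pvEscaped_eq, pvScanA_flatMap]
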